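-- pv_equiv track=rewrite | github.com/MrBrantCode/unitest_baseline | mut_generate/mist_train_taco/taco_13195/solution.py | calculate_tournament_depth
-- ===== SOURCE A (Python) =====
-- def calculate_tournament_depth(N, a):
--     """
--     Calculate the minimum possible depth of the tournament.
--
--     Parameters:
--     - N (int): The number of contestants.
--     - a (list of int): A list where a[i-2] indicates the contestant who defeated contestant i (for i from 2 to N).
--
--     Returns:
--     - int: The minimum possible depth of the tournament.
--     """
--     from collections import defaultdict
--
--     # Create a dictionary to store the children of each contestant
--     dic = defaultdict(list)
--     for i in range(2, N + 1):
--         ai = a[i - 2]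
--         dic[ai].append(i)
--
--     def dfs(nxt):
--         lst = []
--         if nxt in dic:
--             while dic[nxt]:
--                 child = dic[nxt].pop()
--                 tempmax = dfs(child)
--                 lst.append(tempmax)
--         else:
--             return 0
--         lst.sort(reverse=True)
--         for i in range(len(lst)):
--             lst[i] += i + 1
--         return max(lst)
--
--     return dfs(1)
-- ===== SOURCE B (Python) =====
-- def _merged(kids, depth):
--     ds = sorted((depth[c] for c in kids), reverse=True)
--     return max((d + i + 1 for i, d in enumerate(ds)), default=0)
--
--
-- def calculate_tournament_depth(N, a):
--     children = {}
--     for i in range(2, N + 1):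
--         children.setdefault(a[i - 2], []).append(i)
--     depth = {v: 0 for v in range(1, N + 1)}
--     for _ in range(N):
--         new = {v: _merged(children.get(v, []), depth) for v in range(1, N + 1)}
--         if new == depth:
--             break
--         depth = new
--     return depth.get(1, 0)
-- ===== Notes on version B (the rewrite author's own statement) =====
-- stated objective: alternative
-- what changed: Replaces A's mutating recursive DFS over a defaultdict (popping children and merging sorted child depths on the way up) by a bottom-up fixpoint iteration: depths of all nodes are recomputed in whole rounds from the previous round's table until the table stabilizes, and depth[1] is returned.
import Mathlib
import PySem

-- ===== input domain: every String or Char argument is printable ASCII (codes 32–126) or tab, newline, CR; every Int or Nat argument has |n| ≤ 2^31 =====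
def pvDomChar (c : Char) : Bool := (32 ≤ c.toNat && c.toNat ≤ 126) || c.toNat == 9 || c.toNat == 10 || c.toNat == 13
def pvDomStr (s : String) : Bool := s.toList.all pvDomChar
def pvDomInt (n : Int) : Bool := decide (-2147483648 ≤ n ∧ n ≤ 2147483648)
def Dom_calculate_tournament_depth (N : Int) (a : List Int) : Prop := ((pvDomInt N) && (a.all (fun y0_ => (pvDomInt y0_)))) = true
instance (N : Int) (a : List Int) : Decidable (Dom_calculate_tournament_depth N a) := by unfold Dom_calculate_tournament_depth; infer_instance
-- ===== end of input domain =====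

-- B replaces A's mutating recursive DFS by a bottom-up fixpoint iteration over whole rounds
-- of depth tables (objective: alternative algorithm; not claimed faster).

-- ===== PORT A =====
-- lst.sort(reverse=True); for i in range(len(lst)): lst[i] += i + 1; return max(lst)
-- (at every call site of A the list is nonempty, so the `.getD 0` default of max? is never used)
def pvMergeA (lst : List Int) : Int :=
  let s := PySem.List.sorted lst (fun x => x) true
  let s2 := (PySem.List.pyRange 0 (s.length : Int) 1).map (fun i => PySem.List.pyGetD s i 0 + i + 1)
  (PySem.List.max? s2 (fun y => y)).getD 0

-- dfs(nxt) of A, with the mutated defaultdict threaded through.  The Nat argument is fuel for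
-- termination only: every self-call either pops one stored child (the dict shrinks) or directly
-- follows such a pop, and the entry point passes fuel 2*mass+2, which provably exceeds the
-- number of calls, so the fuel-exhausted branches are never reached from the entry point.
mutual
def pvDfsA : Nat → PySem.Dict Int (List Int) → Int → Int × PySem.Dict Int (List Int)
  | 0, d, _ => (0, d)
  | f+1, d, v =>
      if d.contains v then
        let r := pvDrainA f d v []          -- while dic[nxt]: ...  collecting lst
        (pvMergeA r.1, r.2)
      else (0, d)                            -- `else: return 0`
def pvDrainA : Nat → PySem.Dict Int (List Int) → Int → List Int → List Int × PySem.Dict Int (List Int)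
  | 0, d, _, lst => (lst, d)
  | f+1, d, v, lst =>
      match d.getD v [] with
      | [] => (lst, d)
      | x :: xs =>
          let child := (x :: xs).getLast (List.cons_ne_nil x xs)   -- child = dic[nxt].pop()
          let d1 := d.insert v ((x :: xs).dropLast)
          let r := pvDfsA f d1 child                               -- tempmax = dfs(child)
          pvDrainA f r.2 v (lst ++ [r.1])                          -- lst.append(tempmax)
end

-- total number of stored children (fuel bound for pvDfsA)
def pvMass (d : PySem.Dict Int (List Int)) : Nat := (d.values.flatten).length

def calculate_tournament_depth (N : Int) (a : List Int) : Int :=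
  -- dic = defaultdict(list); for i in range(2, N+1): dic[a[i-2]].append(i)
  -- (a[i-2] via pyGetD: exact on Pre_, where the index is always in range)
  let dic := (PySem.List.pyRange 2 (N+1) 1).foldl
      (fun d i => d.modify (PySem.List.pyGetD a (i-2) 0) [] (fun l => l ++ [i])) PySem.Dict.empty
  (pvDfsA (2 * pvMass dic + 2) dic 1).1     -- return dfs(1)

-- ===== PORT B =====
-- _merged(kids, depth): ds = sorted((depth[c] for c in kids), reverse=True);
--                       return max((d + i + 1 for i, d in enumerate(ds)), default=0)
def pvMergeB (ds : List Int) : Int :=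
  let s := PySem.List.sorted ds (fun x => x) true
  (PySem.List.max? ((PySem.List.enumerate s).map (fun p => p.2 + p.1 + 1)) (fun y => y)).getD 0

-- new = {v: _merged(children.get(v, []), depth) for v in range(1, N+1)}
-- (depth[c] via getD: every child c lies in 2..N, hence is a key of depth)
def pvStepB (ch : PySem.Dict Int (List Int)) (N : Int) (depth : PySem.Dict Int Int) : PySem.Dict Int Int :=
  (PySem.List.pyRange 1 (N+1) 1).foldl
    (fun d v => d.insert v (pvMergeB ((ch.getD v []).map (fun c => depth.getD c 0)))) PySem.Dict.empty

-- for _ in range(N): new = ...; if new == depth: break; depth = new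
-- (`new == depth`: both dicts always carry the keys 1..N in the same order, so Python's
--  order-ignoring dict equality coincides with structural equality here)
def pvRoundsB (ch : PySem.Dict Int (List Int)) (N : Int) : Nat → PySem.Dict Int Int → PySem.Dict Int Int
  | 0, depth => depth
  | k+1, depth =>
      let new := pvStepB ch N depth
      if new = depth then depth else pvRoundsB ch N k new

def calculate_tournament_depth_alt (N : Int) (a : List Int) : Int :=
  let children := (PySem.List.pyRange 2 (N+1) 1).foldl
      (fun d i => d.modify (PySem.List.pyGetD a (i-2) 0) [] (fun l => l ++ [i])) PySem.Dict.empty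
  let depth0 := (PySem.List.pyRange 1 (N+1) 1).foldl (fun d v => d.insert v 0) PySem.Dict.empty
  (pvRoundsB children N N.toNat depth0).getD 1 0    -- return depth.get(1, 0)

-- ===== PRECONDITION & SPEC =====
-- Pre_ excludes exactly the inputs on which A raises IndexError (the loop reads a[i-2] for
-- i = 2..N, so it needs len(a) ≥ N-1 whenever N ≥ 2); A returns normally on all other inputs.
def Pre_calculate_tournament_depth (N : Int) (a : List Int) : Prop :=
  N ≤ 1 ∨ N - 1 ≤ (a.length : Int)
instance (N : Int) (a : List Int) : Decidable (Pre_calculate_tournament_depth N a) := by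
  unfold Pre_calculate_tournament_depth; infer_instance

def pvWitness_calculate_tournament_depth : Int × List Int := (3, [1, 1])

def Spec_calculate_tournament_depth (N : Int) (a : List Int) (out : Int) : Prop := out = calculate_tournament_depth_alt N a
instance (N : Int) (a : List Int) (out : Int) : Decidable (Spec_calculate_tournament_depth N a out) := by unfold Spec_calculate_tournament_depth; infer_instance

-- ===== CLAIM (what is proved, stated in full; the proofs are below) =====
def Claim_equal_calculate_tournament_depth : Prop := ∀ (N : Int) (a : List Int), Dom_calculate_tournament_depth N a → Pre_calculate_tournament_depth N a → Spec_calculate_tournament_depth N a (calculate_tournament_depth N a)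

-- ===== LEMMAS AND PROOFS =====

-- all stored children of d, in dict order
def pvElems (d : PySem.Dict Int (List Int)) : List Int := d.values.flatten

theorem pvMass_eq (d : PySem.Dict Int (List Int)) : pvMass d = (pvElems d).length := rfl

-- ---------- equation lemmas for the mutual recursion ----------

theorem pvDfsA_succ (f : Nat) (d : PySem.Dict Int (List Int)) (v : Int) :
    pvDfsA (f+1) d v =
      if d.contains v then (pvMergeA (pvDrainA f d v []).1, (pvDrainA f d v []).2) else (0, d) := by
  simp only [pvDfsA]

theorem pvDrainA_nil (f : Nat) (d : PySem.Dict Int (List Int)) (v : Int) (lst : List Int)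
    (h : d.getD v [] = []) : pvDrainA (f+1) d v lst = (lst, d) := by
  simp only [pvDrainA, h]

theorem pvDrainA_cons (f : Nat) (d : PySem.Dict Int (List Int)) (v : Int) (lst : List Int)
    (x : Int) (xs : List Int) (h : d.getD v [] = x :: xs) :
    pvDrainA (f+1) d v lst =
      pvDrainA f (pvDfsA f (d.insert v ((x :: xs).dropLast)) ((x :: xs).getLast (List.cons_ne_nil x xs))).2 v
        (lst ++ [(pvDfsA f (d.insert v ((x :: xs).dropLast)) ((x :: xs).getLast (List.cons_ne_nil x xs))).1]) := by
  simp only [pvDrainA, h]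

-- ---------- generic dict surgery ----------

theorem pvGet?_eq_some_of_getD_ne (d : PySem.Dict Int (List Int)) (v : Int)
    (h : d.getD v [] ≠ []) : d.get? v = some (d.getD v []) := by
  rcases hg : d.get? v with _ | w
  · exfalso; apply h; simp [PySem.Dict.getD_eq_get?_getD, hg]
  · simp [PySem.Dict.getD_eq_get?_getD, hg]

theorem pvSplit (its : List (Int × List Int)) (v : Int) (l : List Int)
    (h : (PySem.Dict.mk its).get? v = some l) :
    ∃ P Q, its = P ++ (v, l) :: Q ∧ (∀ p ∈ P, p.1 ≠ v) := by
  induction its with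
  | nil => simp [PySem.Dict.get?] at h
  | cons p t ih =>
      rw [PySem.Dict.get?_mk_cons] at h
      by_cases hp : p.1 = v
      · refine ⟨[], t, ?_, by simp⟩
        simp [hp] at h
        obtain ⟨p1, p2⟩ := p
        simp at hp; subst hp; simp [← h]
      · have hbe : (p.1 == v) = false := by simpa using hp
        rw [hbe] at h; simp at h
        obtain ⟨P, Q, h1, h2⟩ := ih h
        exact ⟨p :: P, Q, by simp [h1], by simpa [hp] using h2⟩

theorem pvItemsSplit (d : PySem.Dict Int (List Int)) (v : Int) (l : List Int)
    (hk : d.keys.Nodup) (h : d.get? v = some l) :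
    ∃ P Q, d.items = P ++ (v, l) :: Q ∧ (∀ p ∈ P, p.1 ≠ v) ∧ (∀ p ∈ Q, p.1 ≠ v) := by
  obtain ⟨its⟩ := d
  obtain ⟨P, Q, h1, h2⟩ := pvSplit its v l h
  refine ⟨P, Q, h1, h2, ?_⟩
  have hmap : its.map (·.1) = P.map (·.1) ++ v :: Q.map (·.1) := by simp [h1]
  rw [show (PySem.Dict.mk its).keys = its.map (·.1) from rfl, hmap] at hk
  have hv : v ∉ Q.map (·.1) :=
    (List.nodup_cons.mp (hk.sublist (List.sublist_append_right _ _))).1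
  intro p hp hpv
  exact hv (by simpa [hpv] using List.mem_map_of_mem (f := (·.1)) hp)

theorem pvSurg (d : PySem.Dict Int (List Int)) (v : Int) (l : List Int)
    (hk : d.keys.Nodup) (h : d.get? v = some l) :
    ∃ A B, pvElems d = A ++ l ++ B
      ∧ (∀ w, (d.insert v w).keys = d.keys)
      ∧ (∀ w, pvElems (d.insert v w) = A ++ w ++ B)
      ∧ pvElems (d.erase v) = A ++ B := by
  obtain ⟨P, Q, h1, h2, h3⟩ := pvItemsSplit d v l hk h
  have hcont : d.contains v = true := by
    rw [PySem.Dict.contains_eq_isSome_get?, h]; rfl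
  have hins : ∀ w, (d.insert v w).items = P ++ (v, w) :: Q := by
    intro w
    rw [PySem.Dict.items_insert_of_contains (h := hcont), h1]
    simp only [List.map_append, List.map_cons]
    have e1 : P.map (fun p => if (p.1 == v) = true then (v, w) else p) = P := by
      conv_rhs => rw [← List.map_id P]
      exact List.map_congr_left (fun p hp => by simp [h2 p hp])
    have e3 : Q.map (fun p => if (p.1 == v) = true then (v, w) else p) = Q := by
      conv_rhs => rw [← List.map_id Q]
      exact List.map_congr_left (fun p hp => by simp [h3 p hp])
    have ec : (if (v == v) = true then (v, w) else (v, l)) = (v, w) := by simp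
    rw [e1, e3, ec]
  have her : (d.erase v).items = P ++ Q := by
    show d.items.filter _ = _
    rw [h1, List.filter_append, List.filter_cons]
    have e1 : P.filter (fun p => !(p.1 == v)) = P :=
      List.filter_eq_self.mpr (fun p hp => by simp [h2 p hp])
    have e3 : Q.filter (fun p => !(p.1 == v)) = Q :=
      List.filter_eq_self.mpr (fun p hp => by simp [h3 p hp])
    simp [e1, e3]
  refine ⟨(P.map (·.2)).flatten, (Q.map (·.2)).flatten, ?_, ?_, ?_, ?_⟩
  · simp [pvElems, PySem.Dict.values, h1]
  · intro w
    show (d.insert v w).items.map (·.1) = d.items.map (·.1)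
    rw [hins w, h1]; simp
  · intro w; simp [pvElems, PySem.Dict.values, hins w]
  · simp [pvElems, PySem.Dict.values, her]

theorem pvFindFilter (ts : List (Int × List Int)) (v u : Int) (huv : u ≠ v) :
    (ts.filter (fun q => !(q.1 == v))).find? (fun q => q.1 == u) = ts.find? (fun q => q.1 == u) := by
  induction ts with
  | nil => rfl
  | cons p t ih =>
      rw [List.filter_cons]
      by_cases hpv : p.1 = v
      · rw [if_neg (by simp [hpv])]
        rw [List.find?_cons_of_neg (by simp [hpv]; exact fun hh => huv hh.symm)]
        exact ih
      · rw [if_pos (by simp [hpv])]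
        by_cases hpu : p.1 = u
        · rw [List.find?_cons_of_pos (by simp [hpu]), List.find?_cons_of_pos (by simp [hpu])]
        · rw [List.find?_cons_of_neg (by simp [hpu]), List.find?_cons_of_neg (by simp [hpu])]
          exact ih

theorem pvGet?_erase_of_ne (d : PySem.Dict Int (List Int)) (v u : Int) (huv : u ≠ v) :
    (d.erase v).get? u = d.get? u := by
  show ((d.items.filter (fun q => !(q.1 == v))).find? (fun q => q.1 == u)).map (fun x => x.2)
      = (d.items.find? (fun q => q.1 == u)).map (fun x => x.2)
  rw [pvFindFilter d.items v u huv]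

theorem pvGet?_erase_self (d : PySem.Dict Int (List Int)) (v : Int) :
    (d.erase v).get? v = none := by
  show ((d.items.filter (fun q => !(q.1 == v))).find? (fun q => q.1 == v)).map (fun x => x.2) = none
  have h : (d.items.filter (fun q => !(q.1 == v))).find? (fun q => q.1 == v) = none := by
    rw [List.find?_eq_none]
    intro q hq
    have := List.of_mem_filter hq
    simpa using this
  rw [h]; rfl

theorem pvGetD_erase_of_ne (d : PySem.Dict Int (List Int)) (v u : Int) (huv : u ≠ v) :
    (d.erase v).getD u [] = d.getD u [] := by
  simp [PySem.Dict.getD_eq_get?_getD, pvGet?_erase_of_ne d v u huv]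

theorem pvGetD_erase_self (d : PySem.Dict Int (List Int)) (v : Int) :
    (d.erase v).getD v [] = [] := by
  simp [PySem.Dict.getD_eq_get?_getD, pvGet?_erase_self d v]

theorem pvGetD_erase_sublist (d : PySem.Dict Int (List Int)) (v p : Int) :
    List.Sublist ((d.erase v).getD p []) (d.getD p []) := by
  by_cases hp : p = v
  · subst hp; rw [pvGetD_erase_self]; exact List.nil_sublist _
  · rw [pvGetD_erase_of_ne d v p hp]

theorem pvKeys_erase_sublist (d : PySem.Dict Int (List Int)) (v : Int) :
    List.Sublist ((d.erase v).keys) d.keys := by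
  show List.Sublist ((d.items.filter _).map (fun x => x.1)) (d.items.map (fun x => x.1))
  exact List.filter_sublist.map _

theorem pvSize_erase_lt (d : PySem.Dict Int (List Int)) (v : Int) (h : d.contains v = true) :
    (d.erase v).size < d.size := by
  show (d.items.filter _).length < d.items.length
  have hex : ∃ p ∈ d.items, (p.1 == v) = true := by
    simpa [PySem.Dict.contains, List.any_eq_true] using h
  obtain ⟨p, hp, hpv⟩ := hex
  exact List.length_filter_lt_length_iff_exists.mpr ⟨p, hp, by simp [hpv]⟩

theorem pvValues_eq (d : PySem.Dict Int (List Int)) (hk : d.keys.Nodup) :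
    d.values = d.keys.map (fun k => d.getD k []) := by
  obtain ⟨its⟩ := d
  induction its with
  | nil => rfl
  | cons p t ih =>
      obtain ⟨kx, wx⟩ := p
      rw [show (PySem.Dict.mk ((kx, wx) :: t)).keys = kx :: (PySem.Dict.mk t).keys from rfl,
          List.nodup_cons] at hk
      obtain ⟨hp, hkt⟩ := hk
      show wx :: (PySem.Dict.mk t).values
          = (kx :: (PySem.Dict.mk t).keys).map (fun k => (PySem.Dict.mk ((kx, wx) :: t)).getD k [])
      rw [List.map_cons]
      congr 1
      · simp [PySem.Dict.getD_eq_get?_getD, PySem.Dict.get?_mk_cons]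
      · rw [ih hkt]
        apply List.map_congr_left
        intro k hkmem
        have hkp : (kx == k) = false := by
          simp only [beq_eq_false_iff_ne]; intro hh; exact hp (hh ▸ hkmem)
        simp [PySem.Dict.getD_eq_get?_getD, PySem.Dict.get?_mk_cons, hkp]

theorem pvFlatten_map_sublist (L : List Int) (f g : Int → List Int)
    (h : ∀ k, List.Sublist (f k) (g k)) : List.Sublist ((L.map f).flatten) ((L.map g).flatten) := by
  induction L with
  | nil => simp
  | cons x t ih => simpa using (h x).append ih

-- an element of some stored list is a stored child
theorem pvEntry (d : PySem.Dict Int (List Int)) (q : Int) (hne : d.getD q [] ≠ []) :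
    ∃ e ∈ d.items, e.1 = q ∧ e.2 = d.getD q [] := by
  have hgq := pvGet?_eq_some_of_getD_ne d q hne
  rcases hfound : d.items.find? (fun r => r.1 == q) with _ | e
  · rw [show d.get? q = (d.items.find? (fun r => r.1 == q)).map (fun x => x.2) from rfl, hfound] at hgq
    exact absurd hgq (by simp)
  · have hmem := List.mem_of_find?_eq_some hfound
    have hpred := List.find?_some hfound
    have h2 : e.2 = d.getD q [] := by
      rw [show d.get? q = (d.items.find? (fun r => r.1 == q)).map (fun x => x.2) from rfl, hfound] at hgq
      simpa using hgq
    exact ⟨e, hmem, by simpa using hpred, h2⟩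

theorem pvMemElems (d : PySem.Dict Int (List Int)) {p u : Int} (h : u ∈ d.getD p []) :
    u ∈ pvElems d := by
  obtain ⟨e, he, _, he2⟩ := pvEntry d p (List.ne_nil_of_mem h)
  show u ∈ (d.items.map (fun x => x.2)).flatten
  exact List.mem_flatten.mpr ⟨e.2, List.mem_map_of_mem he, he2 ▸ h⟩

theorem pvFlatten_unique : ∀ (ls : List (Int × List Int)), ((ls.map (fun x => x.2)).flatten).Nodup →
    ∀ e ∈ ls, ∀ e' ∈ ls, ∀ u : Int, u ∈ e.2 → u ∈ e'.2 → e.1 = e'.1 := by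
  intro ls
  induction ls with
  | nil => intro _ e he; simp at he
  | cons hd tl ih =>
      intro hnd e he e' he' u hu hu'
      rw [List.map_cons, List.flatten_cons] at hnd
      have hdisj := List.disjoint_of_nodup_append hnd
      rcases List.mem_cons.mp he with rfl | he2 <;> rcases List.mem_cons.mp he' with rfl | he'2
      · rfl
      · exact absurd (List.mem_flatten.mpr ⟨e'.2, List.mem_map_of_mem he'2, hu'⟩) (hdisj hu)
      · exact absurd (List.mem_flatten.mpr ⟨e.2, List.mem_map_of_mem he2, hu⟩) (hdisj hu')
      · exact ih hnd.of_append_right e he2 e' he'2 u hu hu'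

theorem pvUniq (d : PySem.Dict Int (List Int)) (hnd : (pvElems d).Nodup) {p p' u : Int}
    (h : u ∈ d.getD p []) (h' : u ∈ d.getD p' []) : p = p' := by
  obtain ⟨e, he, he1, he2⟩ := pvEntry d p (List.ne_nil_of_mem h)
  obtain ⟨e', he', he1', he2'⟩ := pvEntry d p' (List.ne_nil_of_mem h')
  have := pvFlatten_unique d.items hnd e he e' he' u (he2 ▸ h) (he2' ▸ h')
  rw [he1, he1'] at this; exact this

-- an element of the middle part of a Nodup concatenation is in neither side
theorem pvMidNotSide {A l B : List Int} (hnd : (A ++ l ++ B).Nodup) {e : Int} (he : e ∈ l) :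
    e ∉ A ++ B := by
  intro hm
  rcases List.mem_append.mp hm with hA | hB
  · have h1 : (A ++ (l ++ B)).Nodup := by simpa [List.append_assoc] using hnd
    exact List.disjoint_of_nodup_append h1 hA (List.mem_append_left _ he)
  · exact List.disjoint_of_nodup_append hnd (List.mem_append_right _ he) hB

theorem pvMidNodup {A l B : List Int} (hnd : (A ++ l ++ B).Nodup) : l.Nodup := by
  have hsub : List.Sublist l (A ++ l ++ B) := by
    have h1 : List.Sublist l (l ++ B) := List.sublist_append_left l B
    have h2 : List.Sublist (l ++ B) (A ++ (l ++ B)) := List.sublist_append_right A (l ++ B)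
    simpa [List.append_assoc] using h1.trans h2
  exact hnd.sublist hsub

-- ---------- reachability ----------

inductive pvReach (d : PySem.Dict Int (List Int)) (c : Int) : Int → Prop where
  | refl : pvReach d c c
  | step {p u : Int} : pvReach d c p → u ∈ d.getD p [] → pvReach d c u

theorem pvReach_trans {d : PySem.Dict Int (List Int)} {c p u : Int}
    (h1 : pvReach d c p) (h2 : pvReach d p u) : pvReach d c u := by
  induction h2 with
  | refl => exact h1
  | step _ hu ih => exact .step ih hu

theorem pvReach_elem {d : PySem.Dict Int (List Int)} {c u : Int} (h : pvReach d c u) :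
    u = c ∨ u ∈ pvElems d := by
  induction h with
  | refl => exact Or.inl rfl
  | step _ hu _ => exact Or.inr (pvMemElems d hu)

theorem pvReach_mono {d d' : PySem.Dict Int (List Int)} {c u : Int}
    (hsub : ∀ p, List.Sublist (d'.getD p []) (d.getD p [])) (h : pvReach d' c u) : pvReach d c u := by
  induction h with
  | refl => exact .refl
  | step _ hu ih => exact .step ih ((hsub _).subset hu)

theorem pvReach_erase_down {d : PySem.Dict Int (List Int)} {v c u : Int}
    (hv : v ∉ pvElems d) (hc : c ≠ v) (h : pvReach d c u) : pvReach (d.erase v) c u := by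
  induction h with
  | refl => exact .refl
  | step hp hu ih =>
      rename_i p u'
      have hpv : p ≠ v := by
        rcases pvReach_elem hp with rfl | hm
        · exact hc
        · exact fun hh => hv (hh ▸ hm)
      exact .step ih (by rwa [pvGetD_erase_of_ne d v p hpv])

theorem pvReach_disjoint (d : PySem.Dict Int (List Int)) (hnd : (pvElems d).Nodup)
    {c c' u : Int} (hc : c ∉ pvElems d) (hc' : c' ∉ pvElems d) (hne : c ≠ c')
    (h : pvReach d c u) (h' : pvReach d c' u) : False := by
  induction h with
  | refl =>
      cases h' with
      | refl => exact hne rfl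
      | step _ hu => exact hc (pvMemElems d hu)
  | step hp hu ih =>
      rename_i p u'
      cases h' with
      | refl => exact hc' (pvMemElems d hu)
      | step hp' hu' =>
          rename_i p'
          have : p = p' := pvUniq d hnd hu hu'
          exact ih (this ▸ hp')

-- residual-state relation for A's dfs/drain
def pvPost (v : Int) (d d' : PySem.Dict Int (List Int)) : Prop :=
  d'.keys = d.keys ∧ (∀ u, List.Sublist (d'.getD u []) (d.getD u [])) ∧
    (∀ u, ¬ pvReach d v u → d'.get? u = d.get? u)

theorem pvPost_refl (v : Int) (d : PySem.Dict Int (List Int)) : pvPost v d d :=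
  ⟨rfl, fun _ => List.Sublist.refl _, fun _ _ => rfl⟩

theorem pvPost_elems {v : Int} {d d' : PySem.Dict Int (List Int)} (hk : d.keys.Nodup)
    (h : pvPost v d d') : List.Sublist (pvElems d') (pvElems d) := by
  obtain ⟨h1, h2, _⟩ := h
  have hk' : d'.keys.Nodup := h1 ▸ hk
  show List.Sublist d'.values.flatten d.values.flatten
  rw [pvValues_eq d hk, pvValues_eq d' hk', h1]
  exact pvFlatten_map_sublist _ _ _ h2

-- ---------- the canonical depth function (spec, by well-founded recursion) ----------

def pvG (d : PySem.Dict Int (List Int)) (c : Int) : Int :=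
  if h : (d.get? c).isSome then
    pvMergeB (((d.get? c).getD []).map (fun e => pvG (d.erase c) e))
  else 0
termination_by d.size
decreasing_by
  exact pvSize_erase_lt d c (by rw [PySem.Dict.contains_eq_isSome_get?, h])

theorem pvG_some (d : PySem.Dict Int (List Int)) (c : Int) (l : List Int) (h : d.get? c = some l) :
    pvG d c = pvMergeB (l.map (fun e => pvG (d.erase c) e)) := by
  rw [pvG]
  rw [dif_pos (by simp [h])]
  simp [h]

theorem pvG_none (d : PySem.Dict Int (List Int)) (c : Int) (h : d.get? c = none) : pvG d c = 0 := by
  rw [pvG]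
  rw [dif_neg (by simp [h])]

-- ---------- the two merge functions agree, and merging ignores order ----------

theorem pvMergeA_eq_pvMergeB (lst : List Int) : pvMergeA lst = pvMergeB lst := by
  simp only [pvMergeA, pvMergeB]
  rw [PySem.List.enumerate_eq_map_pyRange (PySem.List.sorted lst (fun x => x) true) 0,
      List.map_map]
  simp only [PySem.List.len_eq, PySem.List.length_sorted]
  rfl

theorem pvSortedDescUnique : ∀ (l1 l2 : List Int), l1.Perm l2 →
    l1.Pairwise (fun a b => b ≤ a) → l2.Pairwise (fun a b => b ≤ a) → l1 = l2 := by
  intro l1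
  induction l1 with
  | nil =>
      intro l2 hp _ _
      exact (List.Perm.eq_nil hp.symm).symm
  | cons a t ih =>
      intro l2 hp h1 h2
      rcases l2 with _ | ⟨b, s⟩
      · cases List.Perm.eq_nil hp
      · have hab : a = b := by
          have hamem : a ∈ b :: s := hp.subset (by simp)
          have hbmem : b ∈ a :: t := hp.symm.subset (by simp)
          have h1' := List.pairwise_cons.mp h1
          have h2' := List.pairwise_cons.mp h2
          rcases List.mem_cons.mp hamem with hh | hh
          · exact hh
          · rcases List.mem_cons.mp hbmem with hh' | hh'
            · exact hh'.symm
            · have hba : a ≤ b := h2'.1 a hh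
              have hab2 : b ≤ a := h1'.1 b hh'
              omega
        subst hab
        have hts : t.Perm s := hp.cons_inv
        rw [ih s hts (List.pairwise_cons.mp h1).2 (List.pairwise_cons.mp h2).2]

theorem pvMergeB_perm {xs ys : List Int} (h : xs.Perm ys) : pvMergeB xs = pvMergeB ys := by
  unfold pvMergeB
  have hs : PySem.List.sorted xs (fun x => x) true = PySem.List.sorted ys (fun x => x) true := by
    apply pvSortedDescUnique
    · exact ((PySem.List.sorted_perm xs (fun x => x) true).trans h).trans
        (PySem.List.sorted_perm ys (fun x => x) true).symm
    · have := PySem.List.sorted_pairwise_rev xs (fun x => x)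
      simpa using this
    · have := PySem.List.sorted_pairwise_rev ys (fun x => x)
      simpa using this
  rw [hs]

theorem pvMergeB_nil : pvMergeB [] = 0 := rfl

-- ---------- pvG depends only on the reachable entries ----------

theorem pvG_congr : ∀ (n : Nat) (d d' : PySem.Dict Int (List Int)) (c : Int), d.size ≤ n →
    (∀ u, pvReach d c u → d'.get? u = d.get? u) → pvG d c = pvG d' c := by
  intro n
  induction n with
  | zero =>
      intro d d' c hs hag
      have hits : d.items = [] := List.eq_nil_of_length_eq_zero (Nat.le_zero.mp hs)
      have hg : d.get? c = none := by
        show (d.items.find? _).map _ = none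
        rw [hits]; rfl
      have hg' : d'.get? c = none := by rw [hag c .refl, hg]
      rw [pvG_none d c hg, pvG_none d' c hg']
  | succ n ih =>
      intro d d' c hs hag
      rcases hc : d.get? c with _ | l
      · have hc' : d'.get? c = none := by rw [hag c .refl, hc]
        rw [pvG_none d c hc, pvG_none d' c hc']
      · have hc' : d'.get? c = some l := by rw [hag c .refl, hc]
        rw [pvG_some d c l hc, pvG_some d' c l hc']
        congr 1
        apply List.map_congr_left
        intro e he
        have hce : pvReach d c e := .step .refl (by simp [PySem.Dict.getD_eq_get?_getD, hc, he])
        apply ih (d.erase c) (d'.erase c) e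
        · have : (d.erase c).size < d.size :=
            pvSize_erase_lt d c (by rw [PySem.Dict.contains_eq_isSome_get?, hc]; rfl)
          omega
        · intro u hu
          by_cases huc : u = c
          · subst huc; rw [pvGet?_erase_self, pvGet?_erase_self]
          · rw [pvGet?_erase_of_ne d c u huc, pvGet?_erase_of_ne d' c u huc]
            apply hag
            exact pvReach_trans hce (pvReach_mono (pvGetD_erase_sublist d c) hu)

-- ---------- B's iterated depth table ----------

def pvF : Nat → PySem.Dict Int (List Int) → Int → Int
  | 0, _, _ => 0
  | k+1, d, v =>
      match d.get? v with
      | some l => pvMergeB (l.map (fun c => pvF k d c))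
      | none => 0

theorem pvF_succ_some (k : Nat) (d : PySem.Dict Int (List Int)) (v : Int) (l : List Int)
    (h : d.get? v = some l) : pvF (k+1) d v = pvMergeB (l.map (fun c => pvF k d c)) := by
  simp [pvF, h]

theorem pvF_none (k : Nat) (d : PySem.Dict Int (List Int)) (v : Int) (h : d.get? v = none) :
    pvF k d v = 0 := by
  cases k <;> simp [pvF, h]

theorem pvF_erase (k : Nat) (d : PySem.Dict Int (List Int)) (v : Int)
    (hv : v ∉ pvElems d) : ∀ c, c ≠ v → pvF k d c = pvF k (d.erase v) c := by
  induction k with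
  | zero => intro c _; rfl
  | succ k ih =>
      intro c hc
      have hge : (d.erase v).get? c = d.get? c := pvGet?_erase_of_ne d v c hc
      rcases hgc : d.get? c with _ | l
      · rw [pvF_none _ _ _ hgc, pvF_none _ _ _ (by rw [hge, hgc])]
      · rw [pvF_succ_some _ _ _ _ hgc, pvF_succ_some _ _ _ _ (by rw [hge, hgc])]
        congr 1
        apply List.map_congr_left
        intro e he
        have hemem : e ∈ pvElems d :=
          pvMemElems d (p := c) (by simp [PySem.Dict.getD_eq_get?_getD, hgc, he])
        exact ih e (fun hh => hv (hh ▸ hemem))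

theorem pvF_eq_pvG : ∀ (n : Nat) (d : PySem.Dict Int (List Int)) (v : Int), d.keys.Nodup →
    (pvElems d).Nodup → v ∉ pvElems d → d.size ≤ n → pvF n d v = pvG d v := by
  intro n
  induction n with
  | zero =>
      intro d v _ _ _ hs
      have hits : d.items = [] := List.eq_nil_of_length_eq_zero (Nat.le_zero.mp hs)
      have hg : d.get? v = none := by
        show (d.items.find? _).map _ = none
        rw [hits]; rfl
      rw [pvF_none _ _ _ hg, pvG_none _ _ hg]
  | succ n ih =>
      intro d v hk hnd hv hs
      rcases hg : d.get? v with _ | l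
      · rw [pvF_none _ _ _ hg, pvG_none _ _ hg]
      · rw [pvF_succ_some _ _ _ _ hg, pvG_some _ _ _ hg]
        obtain ⟨A, B, hE, _, _, hEer⟩ := pvSurg d v l hk hg
        congr 1
        apply List.map_congr_left
        intro e he
        have heelem : e ∈ pvElems d := by rw [hE]; simp [he]
        have hene : e ≠ v := fun hh => hv (hh ▸ heelem)
        rw [pvF_erase n d v hv e hene]
        apply ih (d.erase v) e
        · exact hk.sublist (pvKeys_erase_sublist d v)
        · rw [hEer]
          have hsub : List.Sublist (A ++ B) (A ++ l ++ B) := by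
            have h1 : List.Sublist (A ++ B) (A ++ (l ++ B)) :=
              (List.Sublist.refl A).append (List.sublist_append_right l B)
            simpa [List.append_assoc] using h1
          exact (hE ▸ hnd).sublist hsub
        · rw [hEer]; exact pvMidNotSide (hE ▸ hnd) he
        · have : (d.erase v).size < d.size :=
            pvSize_erase_lt d v (by rw [PySem.Dict.contains_eq_isSome_get?, hg]; rfl)
          omega

-- ---------- A's dfs/drain compute pvG ----------

theorem pvA_main : ∀ f : Nat,
    (∀ (d : PySem.Dict Int (List Int)) (v : Int), d.keys.Nodup → (pvElems d).Nodup →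
      v ∉ pvElems d → 2 * pvMass d + 2 ≤ f →
      (pvDfsA f d v).1 = pvG d v ∧ pvPost v d (pvDfsA f d v).2)
    ∧ (∀ (d : PySem.Dict Int (List Int)) (v : Int) (lst : List Int), d.keys.Nodup →
      (pvElems d).Nodup → v ∉ pvElems d → 2 * pvMass d + 1 ≤ f →
      (pvDrainA f d v lst).1 = lst ++ (d.getD v []).reverse.map (fun e => pvG (d.erase v) e)
        ∧ pvPost v d (pvDrainA f d v lst).2) := by
  intro f
  induction f with
  | zero =>
      exact ⟨fun d v _ _ _ hf => absurd hf (by omega),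
             fun d v lst _ _ _ hf => absurd hf (by omega)⟩
  | succ f ih =>
      obtain ⟨ihD, ihW⟩ := ih
      constructor
      · -- dfs case
        intro d v hk hnd hv hf
        by_cases hc : d.contains v = true
        · obtain ⟨hval, hpost⟩ := ihW d v [] hk hnd hv (by omega)
          rw [pvDfsA_succ, if_pos hc]
          refine ⟨?_, hpost⟩
          rw [hval, List.nil_append, pvMergeA_eq_pvMergeB]
          rcases hgv : d.get? v with _ | l
          · rw [PySem.Dict.contains_eq_isSome_get?, hgv] at hc; simp at hc
          · rw [pvG_some d v l hgv]
            have hl : d.getD v [] = l := by simp [PySem.Dict.getD_eq_get?_getD, hgv]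
            rw [hl]
            apply pvMergeB_perm
            exact (List.reverse_perm l).map _
        · have hc' : d.contains v = false := by simpa using hc
          rw [pvDfsA_succ, if_neg (by simp [hc'])]
          have hgv : d.get? v = none := by
            rcases hgv : d.get? v with _ | l
            · rfl
            · rw [PySem.Dict.contains_eq_isSome_get?, hgv] at hc'; simp at hc'
          exact ⟨(pvG_none d v hgv).symm, pvPost_refl v d⟩
      · -- drain case
        intro d v lst hk hnd hv hf
        rcases hL : d.getD v [] with _ | ⟨x, xs⟩
        · rw [pvDrainA_nil f d v lst hL]
          refine ⟨by simp [hL], pvPost_refl v d⟩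
        · rw [pvDrainA_cons f d v lst x xs hL]
          have hlne : (x :: xs) ≠ [] := List.cons_ne_nil x xs
          set c : Int := (x :: xs).getLast hlne with hcdef
          set ys : List Int := (x :: xs).dropLast with hysdef
          have hsplit : ys ++ [c] = x :: xs := List.dropLast_append_getLast hlne
          have hget : d.get? v = some (x :: xs) := by
            have := pvGet?_eq_some_of_getD_ne d v (by rw [hL]; exact hlne)
            rwa [hL] at this
          obtain ⟨A, B, hE, hKins, hEins, hEer⟩ := pvSurg d v (x :: xs) hk hget
          have hndl : (A ++ (x :: xs) ++ B).Nodup := hE ▸ hnd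
          set d1 : PySem.Dict Int (List Int) := d.insert v ys with hd1def
          have hE1 : pvElems d1 = A ++ ys ++ B := hEins ys
          have hk1 : d1.keys.Nodup := by rw [hKins ys]; exact hk
          have hys_sub : List.Sublist ys (x :: xs) := by
            rw [← hsplit]; exact List.sublist_append_left ys [c]
          have hsubE1 : List.Sublist (A ++ ys ++ B) (A ++ (x :: xs) ++ B) :=
            ((List.Sublist.refl A).append hys_sub).append (List.Sublist.refl B)
          have hnd1 : (pvElems d1).Nodup := by
            rw [hE1]; exact hndl.sublist hsubE1
          have hcmem : c ∈ (x :: xs) := by rw [← hsplit]; simp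
          have hcelems : c ∈ pvElems d := by
            rw [hE]; exact List.mem_append_left _ (List.mem_append_right _ hcmem)
          have hcv : c ≠ v := fun hh => hv (hh ▸ hcelems)
          have hvne1 : v ∉ pvElems d1 := by
            rw [hE1]; intro hm; apply hv; rw [hE]
            rcases List.mem_append.mp hm with hm1 | hmB
            · rcases List.mem_append.mp hm1 with hmA | hmys
              · exact List.mem_append_left _ (List.mem_append_left _ hmA)
              · exact List.mem_append_left _ (List.mem_append_right _ (hys_sub.subset hmys))
            · exact List.mem_append_right _ hmB
          have hndl' : (A ++ (ys ++ [c]) ++ B).Nodup := by rw [hsplit]; exact hndl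
          have hcyc : c ∉ ys := by
            have hmid : (ys ++ [c]).Nodup := pvMidNodup hndl'
            have := List.disjoint_of_nodup_append hmid
            intro hm; exact this hm (by simp)
          have hcn1 : c ∉ pvElems d1 := by
            rw [hE1]
            intro hm
            rcases List.mem_append.mp hm with hm1 | hmB
            · rcases List.mem_append.mp hm1 with hmA | hmys
              · exact pvMidNotSide hndl' (by simp) (List.mem_append_left _ hmA)
              · exact hcyc hmys
            · exact pvMidNotSide hndl' (by simp) (List.mem_append_right _ hmB)
          have hmassd : pvMass d = (A ++ (x :: xs) ++ B).length := by rw [pvMass_eq, hE]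
          have hmass1 : pvMass d1 = (A ++ ys ++ B).length := by rw [pvMass_eq, hE1]
          have hlys : (x :: xs).length = ys.length + 1 := by
            rw [← hsplit]; simp
          obtain ⟨ht, hpost1⟩ := ihD d1 c hk1 hnd1 hcn1 (by
            simp only [hmassd, hmass1, List.length_append, hlys] at hf ⊢; omega)
          obtain ⟨hpk1, hps1, hpu1⟩ := hpost1
          set d2 : PySem.Dict Int (List Int) := (pvDfsA f d1 c).2 with hd2def
          have hk2 : d2.keys.Nodup := by rw [hpk1]; exact hk1
          have helems2 : List.Sublist (pvElems d2) (pvElems d1) := pvPost_elems hk1 ⟨hpk1, hps1, hpu1⟩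
          have hnd2 : (pvElems d2).Nodup := hnd1.sublist helems2
          have hv2 : v ∉ pvElems d2 := fun hm => hvne1 (helems2.subset hm)
          have hmass2 : pvMass d2 ≤ pvMass d1 := by
            rw [pvMass_eq, pvMass_eq]; exact helems2.length_le
          have hd1v : d1.get? v = some ys := by
            rw [hd1def, PySem.Dict.get?_insert_self]
          have hsub_d1 : ∀ q, List.Sublist (d1.getD q []) (d.getD q []) := by
            intro q
            by_cases hq : q = v
            · rw [hq]
              have hys1 : d1.getD v [] = ys := by
                simp [PySem.Dict.getD_eq_get?_getD, hd1v]
              rw [hys1, hL]; exact hys_sub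
            · have hqe : d1.get? q = d.get? q := PySem.Dict.get?_insert_of_ne _ _ hq
              simp [PySem.Dict.getD_eq_get?_getD, hqe]
          have hreach_v : ¬ pvReach d1 c v := by
            intro hr
            rcases pvReach_elem hr with rfl | hm
            · exact hcv rfl
            · exact hvne1 hm
          have hd2v : d2.get? v = d1.get? v := hpu1 v hreach_v
          have hd2vD : d2.getD v [] = ys := by
            simp [PySem.Dict.getD_eq_get?_getD, hd2v, hd1v]
          obtain ⟨hval2, hpost2⟩ := ihW d2 v (lst ++ [(pvDfsA f d1 c).1]) hk2 hnd2 hv2 (by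
            have h1 : pvMass d1 + 1 = pvMass d := by
              simp only [hmassd, hmass1, List.length_append, hlys]; omega
            omega)
          obtain ⟨hpk2, hps2, hpu2⟩ := hpost2
          constructor
          · -- value
            rw [hval2, hd2vD, ht]
            have htG : pvG d1 c = pvG (d.erase v) c := by
              apply pvG_congr d1.size d1 (d.erase v) c le_rfl
              intro u hr
              have hune : u ≠ v := by
                rcases pvReach_elem hr with rfl | hm
                · exact hcv
                · exact fun hh => hvne1 (hh ▸ hm)
              rw [pvGet?_erase_of_ne d v u hune]
              exact (PySem.Dict.get?_insert_of_ne _ _ hune).symm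
            have hmapys : ∀ e ∈ ys, pvG (d2.erase v) e = pvG (d.erase v) e := by
              intro e he
              have heexs : e ∈ (x :: xs) := hys_sub.subset he
              have heelem : e ∈ pvElems d := by
                rw [hE]; exact List.mem_append_left _ (List.mem_append_right _ heexs)
              have hene : e ≠ v := fun hh => hv (hh ▸ heelem)
              have hec : e ≠ c := fun hh => hcyc (hh ▸ he)
              have hnder : (pvElems (d.erase v)).Nodup := by
                rw [hEer]
                have hsub : List.Sublist (A ++ B) (A ++ (x :: xs) ++ B) := by
                  have h1 : List.Sublist (A ++ B) (A ++ ((x :: xs) ++ B)) :=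
                    (List.Sublist.refl A).append (List.sublist_append_right (x :: xs) B)
                  simpa [List.append_assoc] using h1
                exact hndl.sublist hsub
              have hcer : c ∉ pvElems (d.erase v) := by
                rw [hEer]; exact pvMidNotSide hndl hcmem
              have heer : e ∉ pvElems (d.erase v) := by
                rw [hEer]; exact pvMidNotSide hndl heexs
              refine (pvG_congr (d.erase v).size (d.erase v) (d2.erase v) e le_rfl ?_).symm
              intro u hr
              have hune : u ≠ v := by
                rcases pvReach_elem hr with rfl | hm
                · exact hene
                · rw [hEer] at hm
                  intro hh; subst hh
                  apply hv; rw [hE]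
                  rcases List.mem_append.mp hm with hmA | hmB
                  · exact List.mem_append_left _ (List.mem_append_left _ hmA)
                  · exact List.mem_append_right _ hmB
              rw [pvGet?_erase_of_ne d v u hune, pvGet?_erase_of_ne d2 v u hune]
              have h2nr : ¬ pvReach d1 c u := by
                intro hrc
                have hrd : pvReach d c u := pvReach_mono hsub_d1 hrc
                have hrde : pvReach (d.erase v) c u := pvReach_erase_down hv hcv hrd
                exact pvReach_disjoint (d.erase v) hnder hcer heer (Ne.symm hec) hrde hr
              rw [hpu1 u h2nr]
              exact PySem.Dict.get?_insert_of_ne _ _ hune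
            rw [List.map_congr_left (fun e he => hmapys e (List.mem_reverse.mp he)), htG]
            rw [← hsplit]
            simp
          · -- post
            refine ⟨?_, ?_, ?_⟩
            · rw [hpk2, hpk1, hKins ys]
            · intro u
              exact ((hps2 u).trans (hps1 u)).trans (hsub_d1 u)
            · intro u hnr
              have hunv : u ≠ v := fun hh => hnr (hh ▸ pvReach.refl)
              have h1u : d1.get? u = d.get? u := PySem.Dict.get?_insert_of_ne _ _ hunv
              have hcreach : pvReach d v c := .step .refl (by rw [hL]; exact hcmem)
              have h2nr : ¬ pvReach d1 c u := fun hrc =>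
                hnr (pvReach_trans hcreach (pvReach_mono hsub_d1 hrc))
              have h3nr : ¬ pvReach d2 v u := fun hr2 =>
                hnr (pvReach_mono (fun p => (hps1 p).trans (hsub_d1 p)) hr2)
              rw [hpu2 u h3nr, hpu1 u h2nr, h1u]

-- ---------- the children dict built from the input ----------

theorem pvBuild : ∀ (L : List Int) (pr : Int → Int) (d : PySem.Dict Int (List Int)), d.keys.Nodup →
    ((pvElems (L.foldl (fun d i => d.modify (pr i) [] (fun l => l ++ [i])) d)).Perm (pvElems d ++ L))
    ∧ (L.foldl (fun d i => d.modify (pr i) [] (fun l => l ++ [i])) d).keys.Nodup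
    ∧ (L.foldl (fun d i => d.modify (pr i) [] (fun l => l ++ [i])) d).size ≤ d.size + L.length := by
  intro L
  induction L with
  | nil =>
      intro pr d hk
      exact ⟨by simpa using List.Perm.refl (pvElems d), hk, by simp⟩
  | cons i L ih =>
      intro pr d hk
      rw [List.foldl_cons]
      have hmod : d.modify (pr i) [] (fun l => l ++ [i]) = d.insert (pr i) (d.getD (pr i) [] ++ [i]) := rfl
      have hstep : ((pvElems (d.modify (pr i) [] (fun l => l ++ [i]))).Perm (pvElems d ++ [i]))
          ∧ (d.modify (pr i) [] (fun l => l ++ [i])).keys.Nodup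
          ∧ (d.modify (pr i) [] (fun l => l ++ [i])).size ≤ d.size + 1 := by
        rw [hmod]
        rcases hg : d.get? (pr i) with _ | l
        · have hc : d.contains (pr i) = false := by
            rw [PySem.Dict.contains_eq_isSome_get?, hg]; rfl
          have hgD : d.getD (pr i) [] = [] := by simp [PySem.Dict.getD_eq_get?_getD, hg]
          have hit : (d.insert (pr i) (d.getD (pr i) [] ++ [i])).items
              = d.items ++ [(pr i, [i])] := by
            rw [PySem.Dict.items_insert, if_neg (by simp [hc]), hgD]; rfl
          refine ⟨?_, ?_, ?_⟩
          · have : pvElems (d.insert (pr i) (d.getD (pr i) [] ++ [i]))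
                = pvElems d ++ [i] := by
              simp [pvElems, PySem.Dict.values, hit]
            rw [this]
          · show ((d.insert (pr i) (d.getD (pr i) [] ++ [i])).items.map (fun x => x.1)).Nodup
            rw [hit]
            have hnk : pr i ∉ d.items.map (fun x => x.1) := by
              intro hm
              have : d.contains (pr i) = true := by
                rw [show d.contains (pr i) = (d.items.any (fun p => p.1 == pr i)) from rfl]
                rw [List.any_eq_true]
                obtain ⟨p, hp, hpe⟩ := List.mem_map.mp hm
                exact ⟨p, hp, by simp [hpe]⟩
              rw [this] at hc; cases hc
            simp only [List.map_append, List.map_cons, List.map_nil]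
            rw [List.nodup_append]
            refine ⟨hk, by simp, ?_⟩
            intro b hb bb hbb
            have hbx : bb = pr i := by simpa using hbb
            intro hbe
            exact hnk ((hbe.trans hbx) ▸ hb)
          · show (d.insert (pr i) (d.getD (pr i) [] ++ [i])).items.length ≤ d.items.length + 1
            rw [hit]; simp
        · obtain ⟨A, B, hE, hKins, hEins, _⟩ := pvSurg d (pr i) l hk hg
          have hgD : d.getD (pr i) [] = l := by simp [PySem.Dict.getD_eq_get?_getD, hg]
          have hcont : d.contains (pr i) = true := by
            rw [PySem.Dict.contains_eq_isSome_get?, hg]; rfl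
          refine ⟨?_, ?_, ?_⟩
          · rw [hgD, hEins (l ++ [i]), hE]
            have heq1 : A ++ (l ++ [i]) ++ B = (A ++ l) ++ ([i] ++ B) := by simp
            have heq2 : A ++ l ++ B ++ [i] = (A ++ l) ++ (B ++ [i]) := by simp
            rw [heq1, heq2]
            exact List.Perm.append_left _ List.perm_append_comm
          · rw [hgD, hKins (l ++ [i])]; exact hk
          · show (d.insert (pr i) (d.getD (pr i) [] ++ [i])).items.length ≤ d.items.length + 1
            rw [PySem.Dict.items_insert, if_pos hcont]; simp
      obtain ⟨hp, hk', hs'⟩ := hstep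
      obtain ⟨ihp, ihk, ihs⟩ := ih pr (d.modify (pr i) [] (fun l => l ++ [i])) hk'
      refine ⟨?_, ihk, ?_⟩
      · refine ihp.trans ?_
        refine (hp.append_right L).trans ?_
        simp
      · simp only [List.length_cons]
        omega

-- ---------- B's round tables ----------

theorem pvFoldl_congr {α β : Type} (L : List α) (f g : β → α → β) (b : β)
    (h : ∀ acc x, x ∈ L → f acc x = g acc x) : L.foldl f b = L.foldl g b := by
  induction L generalizing b with
  | nil => rfl
  | cons x t ih =>
      rw [List.foldl_cons, List.foldl_cons, h b x (by simp)]
      exact ih _ (fun acc y hy => h acc y (List.mem_cons_of_mem _ hy))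

theorem pvRound_getD (L : List Int) (f : Int → Int) (c : Int) :
    ((L.foldl (fun d v => d.insert v (f v)) PySem.Dict.empty).getD c 0)
      = if c ∈ L then f c else 0 := by
  induction L using List.reverseRecOn with
  | nil => simp [PySem.Dict.getD_eq_get?_getD, PySem.Dict.get?_empty]
  | append_singleton L x ih =>
      rw [List.foldl_append, List.foldl_cons, List.foldl_nil, PySem.Dict.getD_insert]
      by_cases hcx : c = x
      · subst hcx; simp
      · rw [if_neg hcx, ih]
        by_cases hcL : c ∈ L <;> simp [hcL, hcx]

def pvRoundD (ch : PySem.Dict Int (List Int)) (N : Int) (j : Nat) : PySem.Dict Int Int :=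
  (PySem.List.pyRange 1 (N+1) 1).foldl (fun d v => d.insert v (pvF j ch v)) PySem.Dict.empty

theorem pvStep_round (ch : PySem.Dict Int (List Int)) (N : Int) (j : Nat)
    (hS : ∀ e ∈ pvElems ch, e ∈ PySem.List.pyRange 1 (N+1) 1) :
    pvStepB ch N (pvRoundD ch N j) = pvRoundD ch N (j+1) := by
  unfold pvStepB pvRoundD
  apply pvFoldl_congr
  intro acc v _
  congr 1
  rcases hg : ch.get? v with _ | l
  · have hgD : ch.getD v [] = [] := by simp [PySem.Dict.getD_eq_get?_getD, hg]
    rw [hgD, pvF_none _ _ _ hg, List.map_nil, pvMergeB_nil]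
  · have hgD : ch.getD v [] = l := by simp [PySem.Dict.getD_eq_get?_getD, hg]
    rw [hgD, pvF_succ_some _ _ _ _ hg]
    congr 1
    apply List.map_congr_left
    intro e he
    have hemem : e ∈ PySem.List.pyRange 1 (N+1) 1 :=
      hS e (pvMemElems ch (p := v) (by rw [hgD]; exact he))
    show (pvRoundD ch N j).getD e 0 = pvF j ch e
    unfold pvRoundD
    rw [pvRound_getD, if_pos hemem]

theorem pvF_fix (ch : PySem.Dict Int (List Int)) (S : List Int)
    (hE : ∀ e ∈ pvElems ch, e ∈ S) (j : Nat)
    (h : ∀ v ∈ S, pvF (j+1) ch v = pvF j ch v) :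
    ∀ (m : Nat), ∀ v ∈ S, pvF (j+m) ch v = pvF j ch v := by
  intro m
  induction m with
  | zero => intro v _; rfl
  | succ m ih =>
      intro v hv
      rcases hg : ch.get? v with _ | l
      · rw [pvF_none _ _ _ hg, pvF_none _ _ _ hg]
      · rw [show j + (m+1) = (j+m)+1 from rfl, pvF_succ_some _ _ _ _ hg]
        have hmap : l.map (fun e => pvF (j+m) ch e) = l.map (fun e => pvF j ch e) :=
          List.map_congr_left (fun e he =>
            ih e (hE e (pvMemElems ch (p := v) (by simp [PySem.Dict.getD_eq_get?_getD, hg, he]))))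
        rw [hmap, ← pvF_succ_some j ch v l hg]
        exact h v hv

theorem pvRounds_run (ch : PySem.Dict Int (List Int)) (N : Int)
    (hS : ∀ e ∈ pvElems ch, e ∈ PySem.List.pyRange 1 (N+1) 1)
    (h1 : (1:Int) ∈ PySem.List.pyRange 1 (N+1) 1) :
    ∀ (k j : Nat), (pvRoundsB ch N k (pvRoundD ch N j)).getD 1 0 = pvF (j+k) ch 1 := by
  intro k
  induction k with
  | zero =>
      intro j
      show (pvRoundD ch N j).getD 1 0 = pvF (j+0) ch 1
      unfold pvRoundD
      rw [pvRound_getD, if_pos h1]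
      rfl
  | succ k ih =>
      intro j
      simp only [pvRoundsB]
      rw [pvStep_round ch N j hS]
      by_cases heq : pvRoundD ch N (j+1) = pvRoundD ch N j
      · rw [if_pos heq]
        have hpt : ∀ v ∈ PySem.List.pyRange 1 (N+1) 1, pvF (j+1) ch v = pvF j ch v := by
          intro v hv
          have h2 := congrArg (fun dd => PySem.Dict.getD dd v 0) heq
          simp only at h2
          unfold pvRoundD at h2
          rw [pvRound_getD, pvRound_getD, if_pos hv, if_pos hv] at h2
          exact h2
        show (pvRoundD ch N j).getD 1 0 = pvF (j+(k+1)) ch 1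
        unfold pvRoundD
        rw [pvRound_getD, if_pos h1]
        exact (pvF_fix ch _ hS j hpt (k+1) 1 h1).symm
      · rw [if_neg heq]
        have he : (j+1)+k = j+(k+1) := by omega
        rw [← he]
        exact ih (j+1)

-- ===== VERDICT (by name: the statement is the Claim_ definition above) =====

theorem calculate_tournament_depth_spec : Claim_equal_calculate_tournament_depth := by
  unfold Claim_equal_calculate_tournament_depth
  intro N a _hdom _hpre
  unfold Spec_calculate_tournament_depth
  show (calculate_tournament_depth N a) = _
  unfold calculate_tournament_depth calculate_tournament_depth_alt
  by_cases hN : N ≤ 0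
  · have hr2 : PySem.List.pyRange 2 (N+1) 1 = [] := PySem.List.pyRange_one_eq_nil (by omega)
    have hr1 : PySem.List.pyRange 1 (N+1) 1 = [] := PySem.List.pyRange_one_eq_nil (by omega)
    have hT : N.toNat = 0 := by omega
    rw [hr2, hr1, hT]
    rfl
  · have hN1 : 1 ≤ N := by omega
    obtain ⟨hperm0, hknd, hsize⟩ := pvBuild (PySem.List.pyRange 2 (N+1) 1)
      (fun i => PySem.List.pyGetD a (i-2) 0) PySem.Dict.empty (by exact List.nodup_nil)
    set L : List Int := PySem.List.pyRange 2 (N+1) 1 with hLdef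
    set dic : PySem.Dict Int (List Int) := L.foldl
      (fun d i => d.modify (PySem.List.pyGetD a (i-2) 0) [] (fun l => l ++ [i]))
      PySem.Dict.empty with hdicdef
    have hperm : (pvElems dic).Perm L := by
      have he : pvElems PySem.Dict.empty = [] := rfl
      have := hperm0
      rw [he] at this
      simpa using this
    have hnde : (pvElems dic).Nodup :=
      hperm.nodup_iff.mpr (PySem.List.nodup_pyRange_one 2 (N+1))
    have h1e : (1:Int) ∉ pvElems dic := by
      intro hm
      have := hperm.subset hm
      rw [PySem.List.mem_pyRange_one] at this
      omega
    obtain ⟨hAval, _⟩ := (pvA_main (2 * pvMass dic + 2)).1 dic 1 hknd hnde h1e le_rfl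
    rw [hAval]
    have hS : ∀ e ∈ pvElems dic, e ∈ PySem.List.pyRange 1 (N+1) 1 := by
      intro e he
      have := hperm.subset he
      rw [PySem.List.mem_pyRange_one] at this ⊢
      omega
    have h1r : (1:Int) ∈ PySem.List.pyRange 1 (N+1) 1 := by
      rw [PySem.List.mem_pyRange_one]; omega
    have hd0 : (PySem.List.pyRange 1 (N+1) 1).foldl (fun d v => d.insert v 0) PySem.Dict.empty
        = pvRoundD dic N 0 := by
      unfold pvRoundD
      apply pvFoldl_congr
      intro acc x _
      rfl
    rw [hd0, pvRounds_run dic N hS h1r N.toNat 0]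
    have hsz : dic.size ≤ 0 + N.toNat := by
      have hlen : L.length = ((N+1) - 2).toNat := PySem.List.length_pyRange_one 2 (N+1)
      have hse : (PySem.Dict.empty : PySem.Dict Int (List Int)).size = 0 := rfl
      rw [hse] at hsize
      omega
    rw [pvF_eq_pvG (0 + N.toNat) dic 1 hknd hnde h1e hsz]
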